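-- pv_equiv track=rewrite | github.com/santiagop1/parcial2 | Aislamiento.py | comprobar_victoria
-- ===== SOURCE A (Python) =====
-- NUM_CASILLAS = 8
--
-- def comprobar_victoria(tablero, jugador):
--     for fila in tablero:
--         if all(casilla == jugador for casilla in fila):
--             return True
--     for columna in range(NUM_CASILLAS):
--         if all(tablero[fila][columna] == jugador for fila in range(NUM_CASILLAS)):
--             return True
--     return False
-- ===== SOURCE B (Python) =====
-- NUM_CASILLAS = 8
--
-- def comprobar_victoria(tablero, jugador):
--     # Single pass: keep the set of columns still "alive" (all cells seen so far
--     # equal jugador) and whether some full row was all jugador.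
--     vivas = list(range(NUM_CASILLAS))
--     gano_fila = False
--     for fila in tablero:
--         gano_fila = gano_fila or all(casilla == jugador for casilla in fila)
--         vivas = [j for j in vivas if j < len(fila) and fila[j] == jugador]
--     return gano_fila or bool(vivas)
-- ===== Notes on version B (the rewrite author's own statement) =====
-- stated objective: alternative
-- what changed: B makes a single pass over the rows maintaining an accumulator (the list of columns still entirely equal to jugador, plus a row-win flag), instead of A's two staged passes (a row scan followed by a fixed range(8) index-based column scan).
import Mathlib
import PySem

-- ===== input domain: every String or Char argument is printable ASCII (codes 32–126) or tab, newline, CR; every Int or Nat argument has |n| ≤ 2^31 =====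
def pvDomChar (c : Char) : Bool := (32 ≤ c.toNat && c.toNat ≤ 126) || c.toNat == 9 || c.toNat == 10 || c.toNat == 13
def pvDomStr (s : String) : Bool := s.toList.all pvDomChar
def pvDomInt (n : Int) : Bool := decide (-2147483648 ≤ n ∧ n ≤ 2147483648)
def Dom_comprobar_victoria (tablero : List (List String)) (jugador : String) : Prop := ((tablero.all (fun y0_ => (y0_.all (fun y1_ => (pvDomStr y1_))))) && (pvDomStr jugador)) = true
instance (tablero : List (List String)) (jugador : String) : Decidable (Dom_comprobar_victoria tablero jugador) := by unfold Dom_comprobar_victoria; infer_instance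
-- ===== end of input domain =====

-- B replaces A's two staged passes (row scan, then fixed range(8) column scan) by a single
-- pass over the rows that maintains the list of still-all-jugador columns (objective: alternative).

-- ===== PORT A =====
def comprobar_victoria (tablero : List (List String)) (jugador : String) : Bool :=
  -- first loop: for fila in tablero: if all(...): return True
  if tablero.any (fun fila => fila.all (fun casilla => casilla == jugador)) then true
  else
    -- second loop: for columna in range(8): if all(tablero[fila][columna]==jugador for fila in range(8)): return True
    (PySem.List.pyRange 0 8 1).any (fun columna =>
      (PySem.List.pyRange 0 8 1).all (fun fila =>
        match PySem.List.pyGet? tablero fila with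
        | some f =>
          match PySem.List.pyGet? f columna with
          | some c => c == jugador
          | none => false      -- IndexError in Python; excluded by Pre_
        | none => false))      -- IndexError in Python; excluded by Pre_

-- ===== PORT B =====
-- loop body of B: update (vivas, gano_fila) with one row
def cvPaso (jugador : String) (st : List Int × Bool) (fila : List String) : List Int × Bool :=
  ( -- vivas = [j for j in vivas if j < len(fila) and fila[j] == jugador]
    st.1.filter (fun j => decide (j < (fila.length : Int)) &&
      (match PySem.List.pyGet? fila j with
       | some c => c == jugador
       | none => false)),
    -- gano_fila = gano_fila or all(casilla == jugador for casilla in fila)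
    st.2 || fila.all (fun casilla => casilla == jugador) )

def comprobar_victoria_alt (tablero : List (List String)) (jugador : String) : Bool :=
  let fin := tablero.foldl (cvPaso jugador) (PySem.List.pyRange 0 8 1, false)
  -- return gano_fila or bool(vivas)
  fin.2 || !fin.1.isEmpty

-- ===== PRECONDITION & SPEC =====
-- Pre_ admits boards with a row entirely equal to jugador (both programs answer True at once)
-- and full 8×8 boards (the game's fixed NUM_CASILLAS = 8 domain). It excludes other malformed
-- boards: there A's fixed range(8) indexing raises IndexError or silently truncates the board
-- to an 8×8 window, while B scans the whole board, so they can differ.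
def Pre_comprobar_victoria (tablero : List (List String)) (jugador : String) : Prop :=
  (∃ r ∈ tablero, ∀ c ∈ r, c = jugador) ∨
  (tablero.length = 8 ∧ ∀ r ∈ tablero, r.length = 8)
instance (tablero : List (List String)) (jugador : String) : Decidable (Pre_comprobar_victoria tablero jugador) := by unfold Pre_comprobar_victoria; infer_instance

def pvWitness_comprobar_victoria : List (List String) × String :=
  ([["X","O","O","O","O","O","O","O"],
    ["O","X","O","O","O","O","O","O"],
    ["O","O","X","O","O","O","O","O"],
    ["O","O","O","X","O","O","O","O"],
    ["O","O","O","O","X","O","O","O"],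
    ["O","O","O","O","O","X","O","O"],
    ["O","O","O","O","O","O","X","O"],
    ["O","O","O","O","O","O","O","X"]], "X")

def Spec_comprobar_victoria (tablero : List (List String)) (jugador : String) (out : Bool) : Prop := out = comprobar_victoria_alt tablero jugador
instance (tablero : List (List String)) (jugador : String) (out : Bool) : Decidable (Spec_comprobar_victoria tablero jugador out) := by unfold Spec_comprobar_victoria; infer_instance

-- ===== CLAIM (what is proved, stated in full; the proofs are below) =====
def Claim_equal_comprobar_victoria : Prop := ∀ (tablero : List (List String)) (jugador : String), Dom_comprobar_victoria tablero jugador → Pre_comprobar_victoria tablero jugador → Spec_comprobar_victoria tablero jugador (comprobar_victoria tablero jugador)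

-- ===== LEMMAS AND PROOFS =====

-- the column predicate maintained by B's filter
def cvCol (jugador : String) (tablero : List (List String)) (j : Int) : Bool :=
  tablero.all (fun fila => decide (j < (fila.length : Int)) &&
    (match PySem.List.pyGet? fila j with
     | some c => c == jugador
     | none => false))

-- characterisation of B's single-pass fold
theorem cvFold (jugador : String) (tablero : List (List String)) :
    ∀ (vivas : List Int) (gano : Bool),
      tablero.foldl (cvPaso jugador) (vivas, gano)
        = (vivas.filter (cvCol jugador tablero),
           gano || tablero.any (fun fila => fila.all (fun c => c == jugador))) := by
  induction tablero with
  | nil =>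
    intro vivas gano
    have h : cvCol jugador [] = fun _ => true := funext fun j => by simp [cvCol]
    simp [h]
  | cons f rest ih =>
    intro vivas gano
    simp only [List.foldl_cons, cvPaso, ih, List.any_cons, List.filter_filter, Bool.or_assoc]
    refine congrArg₂ Prod.mk ?_ rfl
    refine List.filter_congr (fun j _ => ?_)
    simp [cvCol, Bool.and_comm]

theorem any_eq_not_isEmpty_filter {α : Type} (p : α → Bool) (l : List α) :
    (!(l.filter p).isEmpty) = l.any p := by
  induction l with
  | nil => simp
  | cons a t ih => by_cases h : p a = true <;> simp [h, ih]

theorem len8 {α : Type} (l : List α) (h : l.length = 8) :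
    ∃ a b c d e f g k, l = [a,b,c,d,e,f,g,k] := by
  match l, h with
  | [a,b,c,d,e,f,g,k], _ => exact ⟨a,b,c,d,e,f,g,k, rfl⟩

-- ===== VERDICT (by name: the statement is the Claim_ definition above) =====
theorem comprobar_victoria_spec : Claim_equal_comprobar_victoria := by
  intro tablero jugador _ hpre
  unfold Spec_comprobar_victoria comprobar_victoria comprobar_victoria_alt
  simp only [cvFold]
  rcases hpre with ⟨r, hr, hall⟩ | ⟨hlen, hrows⟩
  · -- a winning row: A's first scan and B's row-win flag both fire
    have hA : tablero.any (fun fila => fila.all (fun casilla => casilla == jugador)) = true :=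
      List.any_eq_true.2 ⟨r, hr, List.all_eq_true.2 (fun c hc => by simp [hall c hc])⟩
    simp [hA]
  · -- full 8×8 board: both sides reduce to the same 8-column disjunction
    obtain ⟨r0,r1,r2,r3,r4,r5,r6,r7, rfl⟩ := len8 tablero hlen
    simp only [List.mem_cons, forall_eq_or_imp] at hrows
    obtain ⟨h0,h1,h2,h3,h4,h5,h6,h7,-⟩ := hrows
    rw [any_eq_not_isEmpty_filter]
    simp [cvCol, PySem.List.pyRange, PySem.List.pyGet?, PySem.List.pyIdx?,
      h0, h1, h2, h3, h4, h5, h6, h7, List.range_succ, Bool.or_assoc, List.decide_forall_mem, Bool.beq_eq_decide_eq]
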